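-- pv_equiv track=rewrite | github.com/SP2021-2/Algorithm | 01.DataStructure/Stack&Queue/NY/P64061_NY.py | solution
-- ===== SOURCE A (Python) =====
-- def solution(board, moves):
--     answer = 0
--
--     stacks = []
--     bucket = []
--
--     for i in range (len(board)) :
--         tmp = []
--         for j in range(len(board[0])) :
--             if board[j][i] != 0 :
--                 tmp.append(board[j][i])
--         tmp.reverse()
--         stacks.append(tmp)
--
--     for m in range (len(moves)) :
--         try :
--             bucket.append(stacks[moves[m]-1].pop())
--         except IndexError :
--             continue
--
--     for q in range (len(bucket)) :
--         for b in range (len(bucket)) :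
--             if b < len(bucket) - 1 :
--                 if bucket[b] == bucket[b+1] :
--                     bucket.pop(b)
--                     bucket.pop(b)
--                     answer += 2
--
--     return answer
-- ===== SOURCE B (Python) =====
-- def solution(board, moves):
--     # Build each column as a stack (bottom doll first, top doll last), zeros skipped.
--     stacks = []
--     for i in range(len(board)):
--         col = []
--         for j in reversed(range(len(board[0]))):
--             if board[j][i] != 0:
--                 col.append(board[j][i])
--         stacks.append(col)
--
--     # One pass over the moves: grab the top doll and match it against the
--     # top of the basket, cancelling equal adjacent dolls immediately.
--     basket = []
--     answer = 0
--     for m in moves: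
--         try:
--             v = stacks[m - 1].pop()
--         except IndexError:
--             continue
--         if basket and basket[-1] == v:
--             basket.pop()
--             answer += 2
--         else:
--             basket.append(v)
--     return answer
-- ===== Notes on version B (the rewrite author's own statement) =====
-- stated objective: alternative
-- what changed: B replaces A's repeated-scan cancellation phase (whole-bucket passes popping adjacent equal pairs by index until none remain) with a single pass that matches each grabbed doll against the top of the basket stack at the moment it is grabbed; the column build appends in reverse index order instead of building and then reversing.
import Mathlib
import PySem

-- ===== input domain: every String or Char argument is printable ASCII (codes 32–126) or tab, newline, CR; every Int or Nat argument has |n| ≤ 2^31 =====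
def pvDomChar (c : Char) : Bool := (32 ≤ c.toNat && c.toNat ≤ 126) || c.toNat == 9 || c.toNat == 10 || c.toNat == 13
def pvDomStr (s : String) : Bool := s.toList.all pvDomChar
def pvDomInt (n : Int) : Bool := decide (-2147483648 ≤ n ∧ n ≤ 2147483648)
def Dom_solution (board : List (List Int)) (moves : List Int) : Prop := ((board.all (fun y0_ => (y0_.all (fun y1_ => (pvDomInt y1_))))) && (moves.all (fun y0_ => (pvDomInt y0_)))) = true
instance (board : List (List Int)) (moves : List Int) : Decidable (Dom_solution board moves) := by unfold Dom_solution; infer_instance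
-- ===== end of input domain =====

-- B replaces A's repeated-pass pair cancellation of the basket by a single stack pass that
-- matches each grabbed doll against the basket top as it is grabbed — same return value on
-- every input A accepts. (Neither program observably mutates its arguments.)

-- ===== PORT A =====
-- one iteration of 'bucket.append(stacks[moves[m]-1].pop())' with 'except IndexError: continue';
-- state = (stacks, bucket)
def grabStepA (st : List (List Int) × List Int) (m : Int) : List (List Int) × List Int :=
  match PySem.List.pyGet? st.1 (m - 1) with
  | none => st
  | some col =>
    match PySem.List.pop? col with
    | none => st
    | some (v, col') => ((PySem.List.pySet? st.1 (m - 1) col').getD st.1, st.2 ++ [v])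

-- one iteration of A's innermost loop body on state (bucket, answer) at index b
def innerStepA (st : List Int × Int) (b : Nat) : List Int × Int :=
  if b < st.1.length - 1 then
    if st.1.getD b 0 = st.1.getD (b + 1) 0 then
      match PySem.List.pop? st.1 (b : Int) with
      | none => st
      | some (_, l1) =>
        match PySem.List.pop? l1 (b : Int) with
        | none => (l1, st.2)
        | some (_, l2) => (l2, st.2 + 2)
    else st
  else st

-- A's inner 'for b in range(len(bucket))' loop (range frozen at inner-loop entry)
def passA (st : List Int × Int) : List Int × Int :=
  (List.range st.1.length).foldl innerStepA st

def solution (board : List (List Int)) (moves : List Int) : Int :=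
  let stks := (List.range board.length).foldl (fun stks i =>
    stks ++ [((List.range (board.headD []).length).foldl (fun tmp j =>
      match (PySem.List.pyGet? board (j : Int)).bind (fun r => PySem.List.pyGet? r (i : Int)) with
      | some v => if v ≠ 0 then tmp ++ [v] else tmp
      | none => tmp) ([] : List Int)).reverse]) ([] : List (List Int))
  let g := moves.foldl grabStepA (stks, [])
  let r := (List.range g.2.length).foldl (fun st _q => passA st) (g.2, (0 : Int))
  r.2

-- ===== PORT B =====
-- one iteration of B's single pass over moves; state = (stacks, basket, answer)
def stepB (st : List (List Int) × List Int × Int) (m : Int) : List (List Int) × List Int × Int :=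
  match PySem.List.pyGet? st.1 (m - 1) with
  | none => st
  | some col =>
    match PySem.List.pop? col with
    | none => st
    | some (v, col') =>
      let stks' := (PySem.List.pySet? st.1 (m - 1) col').getD st.1
      if st.2.1 ≠ [] ∧ st.2.1.getLast? = some v then
        (stks', st.2.1.dropLast, st.2.2 + 2)
      else
        (stks', st.2.1 ++ [v], st.2.2)

def solution_alt (board : List (List Int)) (moves : List Int) : Int :=
  let stks := (List.range board.length).foldl (fun acc i =>
    acc ++ [(List.range (board.headD []).length).reverse.foldl (fun col j =>
      match (PySem.List.pyGet? board (j : Int)).bind (fun r => PySem.List.pyGet? r (i : Int)) with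
      | some v => if v ≠ 0 then col ++ [v] else col
      | none => col) ([] : List Int)]) ([] : List (List Int))
  (moves.foldl stepB (stks, [], 0)).2.2

-- ===== PRECONDITION & SPEC =====
-- Exactly the inputs on which the Python A returns: A's transpose loop reads board[j][i] for
-- j < len(board[0]) and i < len(board), so it raises IndexError (uncaught) unless
-- len(board[0]) ≤ len(board) and each of those rows has at least len(board) entries.
def Pre_solution (board : List (List Int)) (moves : List Int) : Prop :=
  (board.headD []).length ≤ board.length ∧
  ∀ j, j < (board.headD []).length → board.length ≤ (board.getD j []).length
instance (board : List (List Int)) (moves : List Int) : Decidable (Pre_solution board moves) := by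
  unfold Pre_solution; infer_instance

def pvWitness_solution : List (List Int) × List Int :=
  ([[0, 0, 0, 0, 0], [0, 0, 1, 0, 3], [0, 2, 5, 0, 1], [4, 2, 4, 4, 2], [3, 5, 1, 3, 1]],
   [1, 5, 3, 5, 1, 2, 1, 4])

def Spec_solution (board : List (List Int)) (moves : List Int) (out : Int) : Prop := out = solution_alt board moves
instance (board : List (List Int)) (moves : List Int) (out : Int) : Decidable (Spec_solution board moves out) := by unfold Spec_solution; infer_instance

-- ===== CLAIM (what is proved, stated in full; the proofs are below) =====
def Claim_equal_solution : Prop := ∀ (board : List (List Int)) (moves : List Int), Dom_solution board moves → Pre_solution board moves → Spec_solution board moves (solution board moves)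

-- ===== LEMMAS AND PROOFS =====

-- ---- the head-stack matching machine and the pure reduction it computes ----
def mstep (st : List Int × Int) (v : Int) : List Int × Int :=
  match st.1 with
  | t :: rest => if t = v then (rest, st.2 + 2) else (v :: t :: rest, st.2)
  | [] => ([v], st.2)

def rstep (s : List Int) (v : Int) : List Int :=
  if s.head? = some v then s.tail else v :: s

def nf (l : List Int) : List Int := l.foldl rstep []

theorem mstep_eq (st : List Int × Int) (v : Int) :
    mstep st v = (rstep st.1 v, st.2 + ((st.1.length : Int) + 1 - (rstep st.1 v).length)) := by
  obtain ⟨s, a⟩ := st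
  match s with
  | [] => simp [mstep, rstep]
  | t :: rest =>
    by_cases h : t = v <;> simp [mstep, rstep, h] <;> push_cast <;> ring

theorem mfold (l : List Int) : ∀ (s : List Int) (a : Int),
    l.foldl mstep (s, a) = (l.foldl rstep s, a + ((s.length : Int) + l.length - (l.foldl rstep s).length)) := by
  induction l with
  | nil => intro s a; simp
  | cons v l ih =>
    intro s a
    simp only [List.foldl_cons, mstep_eq (s, a) v]
    rw [ih]
    rw [Prod.mk.injEq]
    refine ⟨rfl, ?_⟩
    simp only [List.length_cons]
    push_cast
    ring

theorem rstep_chain {s : List Int} (h : List.IsChain (· ≠ ·) s) (v : Int) :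
    List.IsChain (· ≠ ·) (rstep s v) := by
  match s with
  | [] => simp [rstep]
  | t :: rest =>
    by_cases hv : t = v
    · simpa [rstep, hv] using h.tail
    · have : ¬ ((t :: rest).head? = some v) := by simpa using hv
      simp only [rstep, if_neg this]
      exact List.isChain_cons_cons.mpr ⟨Ne.symm hv, h⟩

theorem foldl_rstep_chain {s : List Int} (h : List.IsChain (· ≠ ·) s) (l : List Int) :
    List.IsChain (· ≠ ·) (l.foldl rstep s) := by
  induction l generalizing s with
  | nil => exact h
  | cons v l ih => exact ih (rstep_chain h v)

theorem rstep_cancel {s : List Int} (h : List.IsChain (· ≠ ·) s) (x : Int) :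
    rstep (rstep s x) x = s := by
  match s with
  | [] => simp [rstep]
  | t :: rest =>
    by_cases hv : t = x
    · subst hv
      match rest, h with
      | [], _ => simp [rstep]
      | u :: rest', h =>
        have htu : t ≠ u := List.isChain_cons_cons.mp h |>.1
        simp [rstep, Ne.symm htu]
    · simp [rstep, hv, Ne.symm hv]

theorem foldl_rstep_cancel_mid {s : List Int} (h : List.IsChain (· ≠ ·) s) (u v : List Int) (x : Int) :
    (u ++ x :: x :: v).foldl rstep s = (u ++ v).foldl rstep s := by
  rw [List.foldl_append, List.foldl_append, List.foldl_cons, List.foldl_cons,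
    rstep_cancel (foldl_rstep_chain h u) x]

theorem foldl_rstep_of_chain {l : List Int} (h : List.IsChain (· ≠ ·) l) :
    ∀ s : List Int, (∀ x, l.head? = some x → s.head? ≠ some x) →
    l.foldl rstep s = l.reverse ++ s := by
  induction l with
  | nil => intro s _; simp
  | cons v l ih =>
    intro s hs
    have h1 : rstep s v = v :: s := by
      simp only [rstep]
      rw [if_neg (hs v rfl)]
    simp only [List.foldl_cons, h1]
    rw [ih h.tail (v :: s) ?_]
    · simp
    · intro x hx
      simp only [List.head?_cons, Option.some.injEq]
      intro hvx
      cases l with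
      | nil => simp at hx
      | cons y l' =>
        have hne := List.isChain_cons_cons.mp h |>.1
        simp only [List.head?_cons, Option.some.injEq] at hx
        have : v = x := by injection hvx
        exact hne (by omega)

theorem nf_of_chain {l : List Int} (h : List.IsChain (· ≠ ·) l) : nf l = l.reverse := by
  simpa [nf] using foldl_rstep_of_chain h [] (by simp)

-- ---- A's cancellation passes compute |bucket| - |nf bucket| ----
theorem innerStep_id {l : List Int} {a : Int} {b : Nat}
    (h : ¬ (b + 1 < l.length ∧ l.getD b 0 = l.getD (b + 1) 0)) :
    innerStepA (l, a) b = (l, a) := by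
  unfold innerStepA
  push_neg at h
  split_ifs with h1 h2
  · have h1' : b < l.length - 1 := h1
    exact absurd h2 (h (by omega))
  · rfl
  · rfl

theorem erase_erase {l : List Int} {b : Nat} (hb : b + 1 < l.length) :
    (l.eraseIdx b).eraseIdx b = l.take b ++ l.drop (b + 2) := by
  rw [List.eraseIdx_eq_take_drop_succ, List.eraseIdx_eq_take_drop_succ]
  rw [List.take_append_of_le_length (by simp; omega),
      List.take_take, min_self]
  congr 1
  have hlen : (List.take b l).length = b := by simp; omega
  rw [List.drop_append]
  have h2 : List.drop (b+1) (List.take b l) = [] := by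
    apply List.drop_eq_nil_of_le; simp
  rw [h2, hlen, List.drop_drop]
  simp

theorem innerStep_kill {l : List Int} {a : Int} {b : Nat}
    (hb : b + 1 < l.length) (he : l.getD b 0 = l.getD (b + 1) 0) :
    innerStepA (l, a) b = (l.take b ++ l.drop (b + 2), a + 2) := by
  unfold innerStepA
  rw [if_pos (by simp; omega), if_pos he]
  rw [PySem.List.pop?_natCast l b (by omega)]
  simp only
  rw [PySem.List.pop?_natCast (l.eraseIdx b) b (by rw [List.length_eraseIdx_of_lt (by omega)]; omega)]
  simp only
  rw [erase_erase hb]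

theorem kill_decomp {l : List Int} {b : Nat} (hb : b + 1 < l.length)
    (he : l.getD b 0 = l.getD (b + 1) 0) :
    l = l.take b ++ l[b]'(by omega) :: l[b]'(by omega) :: l.drop (b + 2) := by
  have hgb : l[b]'(by omega) :: l.drop (b + 1) = l.drop b := List.getElem_cons_drop (by omega)
  have hgb1 : l[b+1]'(hb) :: l.drop (b + 2) = l.drop (b + 1) := List.getElem_cons_drop hb
  have heq : l[b]'(by omega) = l[b+1]'(hb) := by
    rw [← List.getD_eq_getElem l 0 (show b < l.length by omega), ← List.getD_eq_getElem l 0 hb]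
    exact he
  conv_lhs => rw [← List.take_append_drop b l]
  rw [← hgb, ← hgb1, heq]

theorem nf_kill {l : List Int} {b : Nat} (hb : b + 1 < l.length)
    (he : l.getD b 0 = l.getD (b + 1) 0) :
    nf (l.take b ++ l.drop (b + 2)) = nf l := by
  unfold nf
  conv_rhs => rw [kill_decomp hb he]
  rw [foldl_rstep_cancel_mid (by simp) (l.take b) (l.drop (b + 2)) (l[b]'(by omega))]

theorem inner_inv (bs : List Nat) : ∀ (l : List Int) (a : Int),
    nf (bs.foldl innerStepA (l, a)).1 = nf l ∧
    (bs.foldl innerStepA (l, a)).2 = a + ((l.length : Int) - (bs.foldl innerStepA (l, a)).1.length) ∧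
    (bs.foldl innerStepA (l, a)).1.length ≤ l.length := by
  induction bs with
  | nil => intro l a; refine ⟨rfl, by simp, le_refl _⟩
  | cons b bs ih =>
    intro l a
    by_cases hc : b + 1 < l.length ∧ l.getD b 0 = l.getD (b + 1) 0
    · rw [List.foldl_cons, innerStep_kill hc.1 hc.2]
      obtain ⟨ih1, ih2, ih3⟩ := ih (l.take b ++ l.drop (b + 2)) (a + 2)
      have hlen : (l.take b ++ l.drop (b + 2)).length + 2 = l.length := by
        simp [List.length_take, List.length_drop]; omega
      refine ⟨ih1.trans (nf_kill hc.1 hc.2), ?_, by omega⟩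
      rw [ih2]
      push_cast [← hlen]
      ring
    · rw [List.foldl_cons, innerStep_id hc]
      exact ih l a

theorem foldl_inner_id {l : List Int} {a : Int} (bs : List Nat)
    (h : ∀ b ∈ bs, ¬ (b + 1 < l.length ∧ l.getD b 0 = l.getD (b + 1) 0)) :
    bs.foldl innerStepA (l, a) = (l, a) := by
  induction bs with
  | nil => rfl
  | cons b bs ih =>
    rw [List.foldl_cons, innerStep_id (h b (by simp))]
    exact ih (fun b hb => h b (by simp [hb]))

theorem chain_no_pair {l : List Int} (h : List.IsChain (· ≠ ·) l) (b : Nat) :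
    ¬ (b + 1 < l.length ∧ l.getD b 0 = l.getD (b + 1) 0) := by
  rintro ⟨hb, he⟩
  have := List.isChain_iff_getElem.mp h b hb
  rw [← List.getD_eq_getElem l 0 (show b < l.length by omega), ← List.getD_eq_getElem l 0 hb] at this
  exact this he

theorem pass_of_chain {l : List Int} (h : List.IsChain (· ≠ ·) l) (a : Int) :
    passA (l, a) = (l, a) := by
  exact foldl_inner_id _ (fun b _ => chain_no_pair h b)

theorem pass_progress {l : List Int} (h : ¬ List.IsChain (· ≠ ·) l) (a : Int) :
    (passA (l, a)).1.length + 2 ≤ l.length := by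
  have hP : ∃ b : Nat, b + 1 < l.length ∧ l.getD b 0 = l.getD (b + 1) 0 := by
    by_contra hno
    push_neg at hno
    refine h (List.isChain_iff_getElem.mpr ?_)
    intro i hi
    have := hno i hi
    rw [← List.getD_eq_getElem l 0 (show i < l.length by omega), ← List.getD_eq_getElem l 0 hi]
    exact this
  classical
  set b0 := Nat.find hP with hb0
  obtain ⟨hblt, hbeq⟩ := Nat.find_spec hP
  have hsplit : List.range l.length = List.range b0 ++ (List.range (l.length - b0)).map (b0 + ·) := by
    rw [← List.range_add]
    congr 1
    omega
  have hk : l.length - b0 = (l.length - b0 - 1) + 1 := by omega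
  unfold passA
  simp only
  rw [hsplit, List.foldl_append]
  rw [foldl_inner_id (List.range b0) (fun b hb => Nat.find_min hP (List.mem_range.mp hb))]
  rw [hk, List.range_succ_eq_map, List.map_cons, List.foldl_cons]
  have hkill : innerStepA (l, a) (b0 + 0) = (l.take b0 ++ l.drop (b0 + 2), a + 2) := by
    simpa using innerStep_kill hblt hbeq
  rw [hkill]
  have h3 := (inner_inv (List.map (b0 + ·) (List.map Nat.succ (List.range (l.length - b0 - 1)))) (l.take b0 ++ l.drop (b0 + 2)) (a + 2)).2.2
  have hlen : (l.take b0 ++ l.drop (b0 + 2)).length + 2 = l.length := by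
    simp [List.length_take, List.length_drop]; omega
  omega

def passIter : Nat → (List Int × Int) → (List Int × Int)
  | 0, st => st
  | k + 1, st => passIter k (passA st)

theorem foldl_eq_passIter {β : Type} (bs : List β) (st : List Int × Int) :
    bs.foldl (fun st _ => passA st) st = passIter bs.length st := by
  induction bs generalizing st with
  | nil => rfl
  | cons b bs ih =>
    rw [List.foldl_cons]
    exact ih (passA st)

theorem passIter_fixed {st : List Int × Int} (h : passA st = st) (k : Nat) : passIter k st = st := by
  induction k with
  | zero => rfl
  | succ k ih => rw [passIter, h]; exact ih

theorem passIter_chain (k : Nat) : ∀ (l : List Int) (a : Int), l.length ≤ 2 * k →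
    List.IsChain (· ≠ ·) (passIter k (l, a)).1 := by
  induction k with
  | zero =>
    intro l a hl
    have : l = [] := List.eq_nil_of_length_eq_zero (by omega)
    subst this
    show List.IsChain (· ≠ ·) ([] : List Int)
    simp
  | succ k ih =>
    intro l a hl
    by_cases hc : List.IsChain (· ≠ ·) l
    · rw [show passIter (k + 1) (l, a) = passIter k (passA (l, a)) from rfl,
        pass_of_chain hc, passIter_fixed (pass_of_chain hc a) k]
      exact hc
    · have hprog := pass_progress hc a
      rw [show passIter (k + 1) (l, a) = passIter k (passA (l, a)) from rfl]
      have := ih (passA (l, a)).1 (passA (l, a)).2 (by omega)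
      simpa using this

theorem pass_inv (l : List Int) (a : Int) :
    nf (passA (l, a)).1 = nf l ∧
    (passA (l, a)).2 = a + ((l.length : Int) - (passA (l, a)).1.length) ∧
    (passA (l, a)).1.length ≤ l.length := by
  exact inner_inv (List.range l.length) l a

theorem passIter_inv (k : Nat) : ∀ (l : List Int) (a : Int),
    nf (passIter k (l, a)).1 = nf l ∧
    (passIter k (l, a)).2 = a + ((l.length : Int) - (passIter k (l, a)).1.length) := by
  induction k with
  | zero =>
    intro l a
    exact ⟨rfl, by show (a : Int) = a + ((l.length : Int) - (l.length : Int)); ring⟩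
  | succ k ih =>
    intro l a
    rw [show passIter (k + 1) (l, a) = passIter k (passA (l, a)) from rfl]
    obtain ⟨hp1, hp2, _⟩ := pass_inv l a
    obtain ⟨ih1, ih2⟩ := ih (passA (l, a)).1 (passA (l, a)).2
    simp only [Prod.mk.eta] at ih1 ih2
    refine ⟨ih1.trans hp1, ?_⟩
    rw [ih2, hp2]
    ring

theorem quad_answer (bucket : List Int) :
    ((List.range bucket.length).foldl (fun st _q => passA st) (bucket, (0 : Int))).2 =
      (bucket.length : Int) - (nf bucket).length := by
  rw [foldl_eq_passIter, List.length_range]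
  obtain ⟨h1, h2⟩ := passIter_inv bucket.length bucket 0
  have hch := passIter_chain bucket.length bucket 0 (by omega)
  have hlen : (nf bucket).length = (passIter bucket.length (bucket, 0)).1.length := by
    rw [← h1, nf_of_chain hch, List.length_reverse]
  rw [h2, hlen]
  ring

theorem bfold_answer (l : List Int) :
    (l.foldl mstep ([], (0 : Int))).2 = (l.length : Int) - (nf l).length := by
  rw [mfold]
  simp [nf]

-- ---- B's end-append basket is the head-stack machine on the reversed basket ----
def mstepE (st : List Int × Int) (v : Int) : List Int × Int :=
  if st.1 ≠ [] ∧ st.1.getLast? = some v then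
    (st.1.dropLast, st.2 + 2)
  else
    (st.1 ++ [v], st.2)

theorem mstepE_rev (s : List Int) (a v : Int) :
    mstepE (s.reverse, a) v = ((mstep (s, a) v).1.reverse, (mstep (s, a) v).2) := by
  match s with
  | [] => simp [mstepE, mstep]
  | t :: rest =>
    by_cases hv : t = v
    · subst hv
      simp [mstepE, mstep]
    · have hl : (t :: rest).reverse.getLast? = some t := by simp
      simp [mstepE, mstep, hl, hv]

theorem foldlE_rev (l : List Int) : ∀ (s : List Int) (a : Int),
    l.foldl mstepE (s.reverse, a) = ((l.foldl mstep (s, a)).1.reverse, (l.foldl mstep (s, a)).2) := by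
  induction l with
  | nil => intro s a; rfl
  | cons v l ih =>
    intro s a
    rw [List.foldl_cons, List.foldl_cons, mstepE_rev]
    exact ih (mstep (s, a) v).1 (mstep (s, a) v).2

-- ---- B's fused loop = A's grab phase followed by the matching machine ----
def grabΔ (stks : List (List Int)) (ms : List Int) : List Int :=
  (ms.foldl grabStepA (stks, [])).2

theorem grabStep_acc (stks : List (List Int)) (bucket : List Int) (m : Int) :
    grabStepA (stks, bucket) m =
      ((grabStepA (stks, []) m).1, bucket ++ (grabStepA (stks, []) m).2) := by
  unfold grabStepA
  cases h1 : PySem.List.pyGet? stks (m - 1) with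
  | none => simp
  | some col =>
    cases h2 : PySem.List.pop? col with
    | none => simp [h2]
    | some vc =>
      obtain ⟨v, col'⟩ := vc
      simp [h2]

theorem grab_acc (ms : List Int) : ∀ (stks : List (List Int)) (bucket : List Int),
    ms.foldl grabStepA (stks, bucket) =
      ((ms.foldl grabStepA (stks, [])).1, bucket ++ grabΔ stks ms) := by
  induction ms with
  | nil => intro stks bucket; simp [grabΔ]
  | cons m ms ih =>
    intro stks bucket
    have hmid : ms.foldl grabStepA (grabStepA (stks, []) m) =
        ((ms.foldl grabStepA ((grabStepA (stks, []) m).1, [])).1,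
         (grabStepA (stks, []) m).2 ++ grabΔ (grabStepA (stks, []) m).1 ms) := ih _ _
    rw [List.foldl_cons, grabStep_acc stks bucket m, ih]
    unfold grabΔ
    rw [List.foldl_cons, hmid]
    rw [Prod.mk.injEq]
    refine ⟨rfl, ?_⟩
    rw [List.append_assoc]
    rfl

theorem grabΔ_cons (stks : List (List Int)) (m : Int) (ms : List Int) :
    grabΔ stks (m :: ms) = (grabStepA (stks, []) m).2 ++ grabΔ (grabStepA (stks, []) m).1 ms := by
  have hmid : ms.foldl grabStepA (grabStepA (stks, []) m) =
      ((ms.foldl grabStepA ((grabStepA (stks, []) m).1, [])).1,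
       (grabStepA (stks, []) m).2 ++ grabΔ (grabStepA (stks, []) m).1 ms) := grab_acc ms _ _
  unfold grabΔ
  rw [List.foldl_cons, hmid]
  rfl

theorem stepB_eq (stks : List (List Int)) (bk : List Int) (a : Int) (m : Int) :
    stepB (stks, bk, a) m =
      ((grabStepA (stks, []) m).1, (grabStepA (stks, []) m).2.foldl mstepE (bk, a)) := by
  cases h1 : PySem.List.pyGet? stks (m - 1) with
  | none => simp [stepB, grabStepA, h1]
  | some col =>
    cases h2 : PySem.List.pop? col with
    | none => simp [stepB, grabStepA, h1, h2]
    | some vc =>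
      obtain ⟨v, col'⟩ := vc
      by_cases hc : bk ≠ [] ∧ bk.getLast? = some v
      · simp only [stepB, grabStepA, h1, h2, List.nil_append, List.foldl_cons, List.foldl_nil, mstepE,
          if_pos hc]
      · simp only [stepB, grabStepA, h1, h2, List.nil_append, List.foldl_cons, List.foldl_nil, mstepE,
          if_neg hc]

theorem simB (ms : List Int) : ∀ (stks : List (List Int)) (bk : List Int) (a : Int),
    (ms.foldl stepB (stks, bk, a)).2 = (grabΔ stks ms).foldl mstepE (bk, a) := by
  induction ms with
  | nil => intro stks bk a; rfl
  | cons m ms ih =>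
    intro stks bk a
    rw [List.foldl_cons, grabΔ_cons, stepB_eq]
    rw [List.foldl_append]
    have := ih (grabStepA (stks, []) m).1
      ((grabStepA (stks, []) m).2.foldl mstepE (bk, a)).1
      ((grabStepA (stks, []) m).2.foldl mstepE (bk, a)).2
    simpa using this

-- ---- the column builds agree ----
theorem foldl_opt_filterMap {α : Type} (h : α → Option Int) (xs : List α) : ∀ acc : List Int,
    xs.foldl (fun tmp j =>
      match h j with
      | some v => if v ≠ 0 then tmp ++ [v] else tmp
      | none => tmp) acc =
    acc ++ xs.filterMap (fun j =>
      match h j with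
      | some v => if v ≠ 0 then some v else none
      | none => none) := by
  induction xs with
  | nil => intro acc; simp
  | cons j xs ih =>
    intro acc
    rw [List.foldl_cons, List.filterMap_cons]
    cases hj : h j with
    | none => exact ih acc
    | some v =>
      simp only
      by_cases hv : v ≠ 0
      · rw [if_pos hv, if_pos hv, ih (acc ++ [v])]
        simp
      · rw [if_neg hv, if_neg hv]
        exact ih acc

theorem stacks_eq (board : List (List Int)) :
    ((List.range board.length).foldl (fun stks i =>
      stks ++ [((List.range (board.headD []).length).foldl (fun tmp j =>
        match (PySem.List.pyGet? board (j : Int)).bind (fun r => PySem.List.pyGet? r (i : Int)) with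
        | some v => if v ≠ 0 then tmp ++ [v] else tmp
        | none => tmp) ([] : List Int)).reverse]) ([] : List (List Int)))
    = ((List.range board.length).foldl (fun acc i =>
      acc ++ [(List.range (board.headD []).length).reverse.foldl (fun col j =>
        match (PySem.List.pyGet? board (j : Int)).bind (fun r => PySem.List.pyGet? r (i : Int)) with
        | some v => if v ≠ 0 then col ++ [v] else col
        | none => col) ([] : List Int)]) ([] : List (List Int))) := by
  rw [PySem.List.foldl_append_singleton_eq_map, PySem.List.foldl_append_singleton_eq_map]
  simp only [List.nil_append]
  apply List.map_congr_left
  intro i _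
  rw [foldl_opt_filterMap, foldl_opt_filterMap, List.nil_append, List.nil_append]
  simp only [List.pure_def, List.bind_eq_flatMap, ← List.map_eq_flatMap,
    List.map_reverse, List.filterMap_reverse]

theorem main_general (S : List (List Int)) (ms : List Int) :
    ((List.range (ms.foldl grabStepA (S, [])).2.length).foldl (fun st _q => passA st)
      ((ms.foldl grabStepA (S, [])).2, (0 : Int))).2 = (ms.foldl stepB (S, [], 0)).2.2 := by
  rw [simB ms S [] 0]
  have h := foldlE_rev (grabΔ S ms) [] 0
  rw [List.reverse_nil] at h
  rw [show (ms.foldl grabStepA (S, [])).2 = grabΔ S ms from rfl]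
  rw [h, quad_answer]
  exact (bfold_answer (grabΔ S ms)).symm

-- ===== VERDICT (by name: the statement is the Claim_ definition above) =====
theorem solution_spec : Claim_equal_solution := by
  intro board moves _hdom _hpre
  unfold Spec_solution
  simp only [solution, solution_alt]
  rw [← stacks_eq]
  exact main_general _ moves
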